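-- pv_equiv track=rewrite | github.com/HauseMasterZ/web-scraper | Scraper.py | extract_longest_continuous_numbers
-- ===== SOURCE A (Python) =====
-- def extract_longest_continuous_numbers(string):
--     """
--     Extract the longest continuous sequence of digits from a string.
--
--     Args:
--         string (str): Input string.
--
--     Returns:
--         str: The longest continuous sequence of digits.
--     """
--     longest_sequence = ''
--     current_sequence = ''
--     for char in string:
--         if char.isdigit():
--             current_sequence += char
--         elif current_sequence:
--             if len(current_sequence) > len(longest_sequence):
--                 longest_sequence = current_sequence
--             current_sequence = ''
--     if current_sequence:
--         if len(current_sequence) > len(longest_sequence):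
--             longest_sequence = current_sequence
--     return longest_sequence
-- ===== SOURCE B (Python) =====
-- def extract_longest_continuous_numbers(string):
--     """Group-then-select: two-pointer scan collects every maximal digit run
--     as a slice, then the builtin max picks the first longest one."""
--     runs = []
--     i, n = 0, len(string)
--     while i < n:
--         if string[i].isdigit():
--             j = i
--             while j < n and string[j].isdigit():
--                 j += 1
--             runs.append(string[i:j])
--             i = j
--         else:
--             i += 1
--     return max(runs, key=len, default='')
-- ===== Notes on version B (the rewrite author's own statement) =====
-- stated objective: alternative
-- what changed: Replaces A's running-best accumulator fold with a group-then-select decomposition: a two-pointer index scan extracts each maximal digit run as a slice into a list, then the builtin max by length (with an empty-string default) picks the first longest run.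
import Mathlib
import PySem

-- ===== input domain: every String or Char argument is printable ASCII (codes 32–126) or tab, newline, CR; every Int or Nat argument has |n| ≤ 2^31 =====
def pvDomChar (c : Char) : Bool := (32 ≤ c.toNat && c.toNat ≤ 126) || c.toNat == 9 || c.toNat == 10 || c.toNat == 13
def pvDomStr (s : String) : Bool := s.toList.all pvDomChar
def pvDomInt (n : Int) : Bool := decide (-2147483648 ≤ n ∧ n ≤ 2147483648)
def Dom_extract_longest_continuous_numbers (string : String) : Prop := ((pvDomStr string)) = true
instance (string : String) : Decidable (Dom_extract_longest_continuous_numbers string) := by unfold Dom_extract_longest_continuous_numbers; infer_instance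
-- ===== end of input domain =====

-- B replaces A's running-best accumulator with a group-then-select decomposition (two-pointer
-- scan collecting all maximal digit runs, then first-longest selection); same O(n) cost.
-- Strings are modelled as their char lists (String.toList / String.mk), exact on the ASCII domain.

-- ===== PORT A =====
-- A's loop: state (longest_sequence, current_sequence); final flush after the loop.
def extract_longest_continuous_numbers (string : String) : String :=
  let st := string.toList.foldl
    (fun (st : List Char × List Char) c =>
      if PySem.Chars.isdigit c then (st.1, st.2 ++ [c])
      else if st.2 ≠ [] then
        ((if st.2.length > st.1.length then st.2 else st.1), ([] : List Char))
      else st)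
    ([], [])
  String.mk (if st.2 ≠ [] then (if st.2.length > st.1.length then st.2 else st.1) else st.1)

-- ===== PORT B =====
-- inner `while j < n and string[j].isdigit(): j += 1`
def pvRunEnd (cs : List Char) (j : Nat) : Nat :=
  if h : j < cs.length then
    if PySem.Chars.isdigit cs[j] then pvRunEnd cs (j + 1) else j
  else j
termination_by cs.length - j
decreasing_by omega

theorem pvRunEnd_ge (cs : List Char) (j : Nat) : j ≤ pvRunEnd cs j := by
  fun_induction pvRunEnd cs j with
  | case1 j h hd ih => omega
  | case2 j h hd => omega
  | case3 j h => omega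

theorem pvRunEnd_lt (cs : List Char) (i : Nat) (h : i < cs.length)
    (hd : PySem.Chars.isdigit cs[i] = true) : i < pvRunEnd cs i := by
  rw [pvRunEnd]
  simp only [h, hd, dif_pos, if_pos]
  have := pvRunEnd_ge cs (i + 1)
  omega

-- outer while loop on index i; string[i:j] (0 ≤ i ≤ j) is exactly take/drop here
def pvCollect (cs : List Char) (i : Nat) : List (List Char) :=
  if h : i < cs.length then
    if hd : PySem.Chars.isdigit cs[i] then
      let j := pvRunEnd cs i
      ((cs.drop i).take (j - i)) :: pvCollect cs j
    else pvCollect cs (i + 1)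
  else []
termination_by cs.length - i
decreasing_by
  · have := pvRunEnd_lt cs i h hd; omega
  · omega

-- max(runs, key=len, default=''): first longest element, '' on empty
def pvMaxByLen (rs : List (List Char)) : List Char :=
  match rs with
  | [] => []
  | r :: rest => rest.foldl (fun best x => if x.length > best.length then x else best) r

def extract_longest_continuous_numbers_alt (string : String) : String :=
  String.mk (pvMaxByLen (pvCollect string.toList 0))

-- ===== PRECONDITION & SPEC =====
def Spec_extract_longest_continuous_numbers (string : String) (out : String) : Prop := out = extract_longest_continuous_numbers_alt string
instance (string : String) (out : String) : Decidable (Spec_extract_longest_continuous_numbers string out) := by unfold Spec_extract_longest_continuous_numbers; infer_instance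

-- ===== CLAIM (what is proved, stated in full; the proofs are below) =====
def Claim_equal_extract_longest_continuous_numbers : Prop := ∀ (string : String), Dom_extract_longest_continuous_numbers string → Spec_extract_longest_continuous_numbers string (extract_longest_continuous_numbers string)

-- ===== LEMMAS AND PROOFS =====

-- first-longest selection step (shared shape of A's comparison and Python max's loop)
def pvSel (L C : List Char) : List Char := if C.length > L.length then C else L

-- middle spec: the maximal digit runs of `l`, with a pending run `C` carried in
def pvRm (C : List Char) : List Char → List (List Char)
  | [] => if C = [] then [] else [C]
  | c :: cs =>
      if PySem.Chars.isdigit c then pvRm (C ++ [c]) cs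
      else (if C = [] then [] else [C]) ++ pvRm [] cs

theorem pvRm_mem_ne_nil (l : List Char) : ∀ C r, r ∈ pvRm C l → r ≠ [] := by
  induction l with
  | nil =>
    intro C r h
    rw [pvRm] at h
    by_cases hC : C = []
    · rw [if_pos hC] at h; simp at h
    · rw [if_neg hC] at h
      simp only [List.mem_singleton] at h
      subst h; exact hC
  | cons c cs ih =>
    intro C r h
    rw [pvRm] at h
    by_cases hd : PySem.Chars.isdigit c
    · rw [if_pos hd] at h
      exact ih _ r h
    · rw [if_neg hd] at h
      rcases List.mem_append.mp h with h | h
      · by_cases hC : C = []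
        · rw [if_pos hC] at h; simp at h
        · rw [if_neg hC] at h
          simp only [List.mem_singleton] at h
          subst h; exact hC
      · exact ih _ r h

theorem pvRunEnd_stop (cs : List Char) (j : Nat) :
    ¬ (pvRunEnd cs j < cs.length ∧ PySem.Chars.isdigit cs[pvRunEnd cs j]! = true) := by
  fun_induction pvRunEnd cs j with
  | case1 j h hd ih => exact ih
  | case2 j h hd =>
      intro ⟨h1, h2⟩
      rw [getElem!_pos cs j h] at h2
      exact hd h2
  | case3 j h => intro ⟨h1, _⟩; omega

theorem pvRm_drop_runEnd (cs : List Char) :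
    ∀ n i C, cs.length - i ≤ n →
      pvRm C (cs.drop i) =
        pvRm (C ++ (cs.drop i).take (pvRunEnd cs i - i)) (cs.drop (pvRunEnd cs i)) := by
  intro n
  induction n with
  | zero =>
      intro i C h
      have hi : cs.length ≤ i := by omega
      have : pvRunEnd cs i = i := by rw [pvRunEnd]; simp [Nat.not_lt.mpr hi]
      simp [this]
  | succ n ih =>
      intro i C h
      by_cases hlt : i < cs.length
      · by_cases hd : PySem.Chars.isdigit cs[i]
        · have hre : pvRunEnd cs i = pvRunEnd cs (i + 1) := by
            rw [pvRunEnd]; simp [hlt, hd]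
          have hdrop : cs.drop i = cs[i] :: cs.drop (i + 1) := List.drop_eq_getElem_cons hlt
          have hstep : pvRm C (cs.drop i) = pvRm (C ++ [cs[i]]) (cs.drop (i + 1)) := by
            rw [hdrop]; simp [pvRm, hd]
          rw [hstep, ih (i + 1) (C ++ [cs[i]]) (by omega), hre]
          have hge : i + 1 ≤ pvRunEnd cs (i + 1) := pvRunEnd_ge cs (i + 1)
          have harg : (C ++ [cs[i]]) ++ (cs.drop (i + 1)).take (pvRunEnd cs (i + 1) - (i + 1))
              = C ++ (cs.drop i).take (pvRunEnd cs (i + 1) - i) := by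
            rw [hdrop]
            have hj1 : pvRunEnd cs (i + 1) - i = (pvRunEnd cs (i + 1) - (i + 1)) + 1 := by omega
            rw [hj1, List.take_succ_cons]
            simp
          rw [harg]
        · have : pvRunEnd cs i = i := by rw [pvRunEnd]; simp [hlt, hd]
          simp [this]
      · have : pvRunEnd cs i = i := by rw [pvRunEnd]; simp [Nat.not_lt.mpr (by omega : cs.length ≤ i)]
        simp [this]

theorem pvCollect_eq_pvRm (cs : List Char) :
    ∀ n i, cs.length - i ≤ n → pvCollect cs i = pvRm [] (cs.drop i) := by
  intro n
  induction n with
  | zero =>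
      intro i h
      have hi : cs.length ≤ i := by omega
      rw [pvCollect]
      simp [Nat.not_lt.mpr hi, List.drop_eq_nil_of_le hi, pvRm]
  | succ n ih =>
      intro i h
      by_cases hlt : i < cs.length
      · by_cases hd : PySem.Chars.isdigit cs[i] = true
        · set j := pvRunEnd cs i with hj
          have hji : i < j := pvRunEnd_lt cs i hlt hd
          have hcol : pvCollect cs i = ((cs.drop i).take (j - i)) :: pvCollect cs j := by
            rw [pvCollect]; simp [hlt, hd, ← hj]
          set K := (cs.drop i).take (j - i) with hK
          have hKne : K ≠ [] := by
            have h1 : (cs.drop i).length = cs.length - i := List.length_drop ..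
            have : K.length = min (j - i) (cs.length - i) := by
              rw [hK, List.length_take, h1]
            intro hnil
            rw [hnil] at this
            simp at this
            omega
          have hmid : pvRm [] (cs.drop i) = pvRm K (cs.drop j) := by
            have := pvRm_drop_runEnd cs (cs.length - i) i [] (by omega)
            simpa [← hj, ← hK] using this
          have htail : pvRm K (cs.drop j) = K :: pvRm [] (cs.drop j) := by
            by_cases hjl : j < cs.length
            · have hstop := pvRunEnd_stop cs i
              rw [← hj] at hstop
              have hnd : ¬ PySem.Chars.isdigit (cs[j]'hjl) = true := by
                intro hdj
                exact hstop ⟨hjl, by rw [getElem!_pos cs j hjl]; exact hdj⟩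
              have hdropj : cs.drop j = (cs[j]'hjl) :: cs.drop (j + 1) := List.drop_eq_getElem_cons hjl
              rw [hdropj, pvRm, if_neg hnd, if_neg hKne]
              rw [pvRm, if_neg hnd]
              simp
            · have hnil : cs.drop j = [] := List.drop_eq_nil_of_le (by omega)
              rw [hnil, pvRm, if_neg hKne, pvRm]
              simp
          rw [hcol, hmid, htail, ih j (by omega)]
        · have hcol : pvCollect cs i = pvCollect cs (i + 1) := by
            rw [pvCollect]; simp [hlt, hd]
          have hdrop : cs.drop i = cs[i] :: cs.drop (i + 1) := List.drop_eq_getElem_cons hlt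
          rw [hcol, ih (i + 1) (by omega), hdrop, pvRm, if_neg hd]
          simp
      · rw [pvCollect]
        have hdrop : cs.drop i = [] := List.drop_eq_nil_of_le (by omega)
        simp [Nat.not_lt.mpr (by omega : cs.length ≤ i), hdrop, pvRm]

def pvStepA (st : List Char × List Char) (c : Char) : List Char × List Char :=
  if PySem.Chars.isdigit c then (st.1, st.2 ++ [c])
  else if st.2 ≠ [] then ((if st.2.length > st.1.length then st.2 else st.1), []) else st

def pvFin (st : List Char × List Char) : List Char :=
  if st.2 ≠ [] then (if st.2.length > st.1.length then st.2 else st.1) else st.1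

theorem foldl_stepA_eq (l : List Char) :
    ∀ L C, pvFin (l.foldl pvStepA (L, C)) = (pvRm C l).foldl pvSel L := by
  induction l with
  | nil =>
      intro L C
      by_cases hC : C = [] <;> simp [pvRm, pvFin, pvSel, hC]
  | cons c cs ih =>
      intro L C
      rw [List.foldl_cons, pvRm]
      by_cases hd : PySem.Chars.isdigit c
      · rw [if_pos hd]
        have hstep : pvStepA (L, C) c = (L, C ++ [c]) := by simp [pvStepA, hd]
        rw [hstep, ih]
      · rw [if_neg hd]
        by_cases hC : C = []
        · have hstep : pvStepA (L, C) c = (L, C) := by simp [pvStepA, hd, hC]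
          rw [hstep, if_pos hC, List.nil_append]
          subst hC
          exact ih L []
        · have hstep : pvStepA (L, C) c = ((if C.length > L.length then C else L), []) := by
            simp [pvStepA, hd, hC]
          rw [hstep, if_neg hC, ih, List.cons_append, List.nil_append, List.foldl_cons]
          rfl

theorem pvMaxByLen_eq_foldl (rs : List (List Char)) (hne : ∀ r ∈ rs, r ≠ []) :
    pvMaxByLen rs = rs.foldl pvSel [] := by
  cases rs with
  | nil => rfl
  | cons r rest =>
      have hr : r ≠ [] := hne r (by simp)
      have : pvSel [] r = r := by
        unfold pvSel
        have : 0 < r.length := List.length_pos_iff.mpr hr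
        simp [this]
      simp only [pvMaxByLen, List.foldl_cons]
      rw [this]
      rfl

-- ===== VERDICT (by name: the statement is the Claim_ definition above) =====
theorem extract_longest_continuous_numbers_spec : Claim_equal_extract_longest_continuous_numbers := by
  intro s _
  unfold Spec_extract_longest_continuous_numbers
  have h2 : pvCollect s.toList 0 = pvRm [] s.toList := by
    simpa using pvCollect_eq_pvRm s.toList s.toList.length 0 (by omega)
  have h3 : pvMaxByLen (pvCollect s.toList 0) = (pvCollect s.toList 0).foldl pvSel [] :=
    pvMaxByLen_eq_foldl _ (fun r hr => pvRm_mem_ne_nil s.toList [] r (h2 ▸ hr))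
  show String.mk (pvFin (s.toList.foldl pvStepA ([], []))) = String.mk (pvMaxByLen (pvCollect s.toList 0))
  rw [foldl_stepA_eq, h3, h2]
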